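-- pv_equiv track=rewrite | github.com/MarshalZhang/2017A2CS | Ch24/Recurrsion.py | array220
-- ===== SOURCE A (Python) =====
-- def array220(x,i):
--     if i==len(x)-2 and x[i+1]== 10* x[i]:
--         return True
--     elif i==len(x)-2 and x[i+1]!= 10*x[i]:
--         return False
--     else:
--         if x[i+1]== 10*x[i]:
--             return True
--         else:
--             return array220(x,i+1)
-- ===== SOURCE B (Python) =====
-- def array220(x, i):
--     # test the pair at i directly, then scan the remaining pairs
--     if x[i + 1] == 10 * x[i]:
--         return True
--     return any(x[j + 1] == 10 * x[j] for j in range(i + 1, len(x) - 1))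
-- ===== Notes on version B (the rewrite author's own statement) =====
-- stated objective: simpler
-- what changed: Replaced the three-branch tail recursion with a non-recursive decomposition: test the pair at i directly, then any(...) over range(i+1, len(x)-1) for the remaining pairs.
import Mathlib
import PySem

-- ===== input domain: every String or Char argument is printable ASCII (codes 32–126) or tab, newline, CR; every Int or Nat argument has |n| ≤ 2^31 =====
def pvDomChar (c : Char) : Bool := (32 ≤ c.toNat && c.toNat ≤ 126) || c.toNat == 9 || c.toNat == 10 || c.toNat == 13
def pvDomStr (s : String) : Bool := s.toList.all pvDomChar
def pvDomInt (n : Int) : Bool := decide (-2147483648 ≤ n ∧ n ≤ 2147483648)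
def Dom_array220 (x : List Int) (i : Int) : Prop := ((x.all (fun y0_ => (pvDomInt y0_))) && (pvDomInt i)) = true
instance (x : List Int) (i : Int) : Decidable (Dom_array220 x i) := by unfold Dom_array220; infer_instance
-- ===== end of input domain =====

-- B replaces A's three-branch recursion by a direct test of the pair at i followed by any(...) over the remaining pairs; return values agree wherever A returns (Pre_).

-- ===== PORT A =====
-- transliteration of A's recursion; fuel only makes it total, on Pre_ inputs it never runs out
def array220Go (x : List Int) : Nat → Int → Bool
  | 0, _ => false
  | fuel + 1, i =>
    match PySem.List.pyGet? x (i + 1), PySem.List.pyGet? x i with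
    | some a, some b =>
      if i = (x.length : Int) - 2 ∧ a = 10 * b then true
      else if i = (x.length : Int) - 2 ∧ a ≠ 10 * b then false
      else if a = 10 * b then true
      else array220Go x fuel (i + 1)
    | _, _ => false  -- IndexError (outside Pre_)

def array220 (x : List Int) (i : Int) : Bool :=
  array220Go x (2 * x.length + 1) i

-- ===== PORT B =====
-- B's pair test x[j+1] == 10*x[j], named so the any(...) can cite it
def array220Pair (x : List Int) (j : Int) : Bool :=
  match PySem.List.pyGet? x (j + 1), PySem.List.pyGet? x j with
  | some a, some b => a == 10 * b
  | _, _ => false  -- IndexError (outside Pre_)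

-- transliteration of B: the if on the pair at i, then any over range(i+1, len(x)-1)
def array220_alt (x : List Int) (i : Int) : Bool :=
  if array220Pair x i then true
  else (PySem.List.pyRange (i + 1) ((x.length : Int) - 1) 1).any (array220Pair x)

-- ===== PRECONDITION & SPEC =====
-- Pre_ is exactly where the Python A returns: outside it A raises IndexError
-- (x[i+1] or x[i] out of range, including via negative-index wraparound).
def Pre_array220 (x : List Int) (i : Int) : Prop :=
  -(x.length : Int) ≤ i ∧ i ≤ (x.length : Int) - 2
instance (x : List Int) (i : Int) : Decidable (Pre_array220 x i) := by
  unfold Pre_array220; infer_instance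

def pvWitness_array220 : List Int × Int := ([3, 30, 7], 0)

def Spec_array220 (x : List Int) (i : Int) (out : Bool) : Prop := out = array220_alt x i
instance (x : List Int) (i : Int) (out : Bool) : Decidable (Spec_array220 x i out) := by unfold Spec_array220; infer_instance

-- ===== CLAIM =====
def Claim_equal_array220 : Prop := ∀ (x : List Int) (i : Int), Dom_array220 x i → Pre_array220 x i → Spec_array220 x i (array220 x i)

-- ===== LEMMAS AND PROOFS =====

theorem pyGet?_isSome_of_inRange {x : List Int} {j : Int}
    (h1 : -(x.length : Int) ≤ j) (h2 : j < (x.length : Int)) :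
    ∃ v, PySem.List.pyGet? x j = some v := by
  cases hv : PySem.List.pyGet? x j with
  | none =>
      rw [PySem.List.pyGet?_eq_none_iff] at hv
      exact absurd ⟨h1, h2⟩ hv
  | some v => exact ⟨v, rfl⟩

-- A's recursion computes 'some pair from i on matches', i.e. any over pyRange i (len-1)
theorem array220Go_eq_anyPairs (x : List Int) :
    ∀ (fuel : Nat) (i : Int), -(x.length : Int) ≤ i → i ≤ (x.length : Int) - 2 →
      ((x.length : Int) - 1 - i).toNat ≤ fuel →
      array220Go x fuel i
        = (PySem.List.pyRange i ((x.length : Int) - 1) 1).any (array220Pair x) := by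
  intro fuel
  induction fuel with
  | zero =>
      intro i h1 h2 hf
      omega
  | succ fuel ih =>
      intro i h1 h2 hf
      obtain ⟨a, ha⟩ := pyGet?_isSome_of_inRange (x := x) (j := i + 1) (by omega) (by omega)
      obtain ⟨b, hb⟩ := pyGet?_isSome_of_inRange (x := x) (j := i) (by omega) (by omega)
      unfold array220Go
      rw [PySem.List.pyRange_one_cons (by omega), List.any_cons]
      have hp : array220Pair x i = (a == 10 * b) := by
        unfold array220Pair; rw [ha, hb]
      simp only [ha, hb, hp]
      by_cases hab : a = 10 * b
      · simp [hab]
      · simp only [beq_eq_false_iff_ne.mpr hab, Bool.false_or]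
        by_cases heq : i = (x.length : Int) - 2
        · rw [if_neg (fun h => hab h.2), if_pos ⟨heq, hab⟩,
            PySem.List.pyRange_one_eq_nil (by omega)]
          simp
        · rw [if_neg (fun h => hab h.2), if_neg (fun h => heq h.1), if_neg hab]
          exact ih (i + 1) (by omega) (by omega) (by omega)

-- B's 'test pair i, then any over the rest' is the same any over pyRange i (len-1)
theorem alt_eq_anyPairs (x : List Int) (i : Int)
    (h2 : i ≤ (x.length : Int) - 2) :
    array220_alt x i
      = (PySem.List.pyRange i ((x.length : Int) - 1) 1).any (array220Pair x) := by
  unfold array220_alt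
  rw [show PySem.List.pyRange i ((x.length : Int) - 1) 1
        = i :: PySem.List.pyRange (i + 1) ((x.length : Int) - 1) 1
      from PySem.List.pyRange_one_cons (by omega), List.any_cons]
  by_cases hp : array220Pair x i = true
  · simp [hp]
  · simp [Bool.eq_false_iff.mpr hp]

-- ===== VERDICT =====
theorem array220_spec : Claim_equal_array220 := by
  intro x i _ hpre
  obtain ⟨h1, h2⟩ := hpre
  unfold Spec_array220 array220
  rw [alt_eq_anyPairs x i h2]
  exact array220Go_eq_anyPairs x (2 * x.length + 1) i h1 h2 (by omega)
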